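-- pv_equiv track=rewrite | github.com/pytest-dev/pytest-cpp | src/pytest_cpp/error.py | get_left_whitespace
-- ===== SOURCE A (Python) =====
-- import string
--
-- def get_left_whitespace(line: str) -> str:
--     result = ""
--     for c in line:
--         if c in string.whitespace:
--             result += c
--         else:
--             break
--     return result
-- ===== SOURCE B (Python) =====
-- import string
--
-- def get_left_whitespace(line: str) -> str:
--     return line[:len(line) - len(line.lstrip(string.whitespace))]
-- ===== Notes on version B (the rewrite author's own statement) =====
-- stated objective: simpler
-- what changed: Replaces the per-character append-until-break loop with a single expression that computes the prefix length as len(line) minus the length of line.lstrip(string.whitespace) and slices it off.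
import Mathlib
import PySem

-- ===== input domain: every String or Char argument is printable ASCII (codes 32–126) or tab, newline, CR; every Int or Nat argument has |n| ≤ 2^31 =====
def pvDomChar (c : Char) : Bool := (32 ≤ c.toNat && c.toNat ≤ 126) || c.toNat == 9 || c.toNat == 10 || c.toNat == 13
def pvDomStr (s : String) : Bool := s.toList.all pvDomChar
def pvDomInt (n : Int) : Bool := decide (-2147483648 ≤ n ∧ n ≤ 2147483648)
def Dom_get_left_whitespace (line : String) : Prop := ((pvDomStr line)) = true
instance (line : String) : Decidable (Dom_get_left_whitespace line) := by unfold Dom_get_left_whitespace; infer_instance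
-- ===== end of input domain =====

-- B replaces A's append-until-break character loop by one slice whose length is
-- len(line) - len(line.lstrip(string.whitespace)) (objective: simpler).

-- string.whitespace = ' \t\n\r\x0b\x0c'
def pvWhitespace : List Char := [' ', '\t', '\n', '\r', '\x0b', '\x0c']

-- ===== PORT A =====
-- the for-loop with break: recurse over the characters, accumulating `result`
def getLeftWsGo : List Char → String → String
  | [], result => result
  | c :: rest, result =>
    if pvWhitespace.contains c then getLeftWsGo rest (result.push c) else result

def get_left_whitespace (line : String) : String :=
  getLeftWsGo line.toList ""

-- ===== PORT B =====
-- line.lstrip(chars) drops leading characters that are in chars: exactly List.dropWhile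
def get_left_whitespace_alt (line : String) : String :=
  let cs := line.toList
  let stripped := cs.dropWhile (fun c => pvWhitespace.contains c)
  String.ofList (PySem.List.slice cs none (some ((cs.length : Int) - (stripped.length : Int))))

-- ===== PRECONDITION & SPEC =====
def Spec_get_left_whitespace (line : String) (out : String) : Prop := out = get_left_whitespace_alt line
instance (line : String) (out : String) : Decidable (Spec_get_left_whitespace line out) := by unfold Spec_get_left_whitespace; infer_instance

-- ===== CLAIM (what is proved, stated in full; the proofs are below) =====
def Claim_equal_get_left_whitespace : Prop := ∀ (line : String), Dom_get_left_whitespace line → Spec_get_left_whitespace line (get_left_whitespace line)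

-- ===== LEMMAS AND PROOFS =====

theorem take_length_takeWhile' (p : Char → Bool) (l : List Char) :
    l.take (l.takeWhile p).length = l.takeWhile p := by
  induction l with
  | nil => simp
  | cons c rest ih => by_cases h : p c <;> simp [h, ih]

theorem getLeftWsGo_eq (cs : List Char) (res : String) :
    getLeftWsGo cs res = res ++ String.ofList (cs.takeWhile (fun c => pvWhitespace.contains c)) := by
  induction cs generalizing res with
  | nil => apply String.ext; simp [getLeftWsGo]
  | cons c rest ih =>
    by_cases h : pvWhitespace.contains c
    · rw [getLeftWsGo, if_pos h, ih]
      apply String.ext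
      simp [List.contains_iff_mem.mp h]
    · rw [getLeftWsGo, if_neg h]
      apply String.ext
      have h' : c ∉ pvWhitespace := by simpa using h
      simp [h']

theorem get_left_whitespace_spec : Claim_equal_get_left_whitespace := by
  unfold Claim_equal_get_left_whitespace
  intro line _
  unfold Spec_get_left_whitespace get_left_whitespace get_left_whitespace_alt
  rw [getLeftWsGo_eq]
  have hlen : line.toList.length - (line.toList.dropWhile (fun c => pvWhitespace.contains c)).length
      = (line.toList.takeWhile (fun c => pvWhitespace.contains c)).length := by
    have := List.takeWhile_append_dropWhile (p := fun c => pvWhitespace.contains c) (l := line.toList)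
    have hl : (line.toList.takeWhile (fun c => pvWhitespace.contains c)).length
        + (line.toList.dropWhile (fun c => pvWhitespace.contains c)).length = line.toList.length := by
      have h2 := congrArg List.length this
      rw [List.length_append] at h2
      simpa using h2
    omega
  have hcast : ((line.toList.length : Int) - ((line.toList.dropWhile (fun c => pvWhitespace.contains c)).length : Int))
      = ((line.toList.takeWhile (fun c => pvWhitespace.contains c)).length : Int) := by
    have hle : (line.toList.dropWhile (fun c => pvWhitespace.contains c)).length ≤ line.toList.length :=
      List.length_dropWhile_le _ _
    omega
  simp only [hcast, PySem.List.slice_to_natCast, take_length_takeWhile']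
  apply String.ext
  simp
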